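-- pv_equiv track=rewrite | github.com/rishi-menon/aoc_2025 | day_02/main.py | calc_count
-- ===== SOURCE A (Python) =====
-- def sign(x):
--     assert x != 0
--     return 1 if x > 0 else -1
--
-- def calc_count(values):
--     cur_pos = 50
--     counter = 0
--     intermediate = []
--     for i, value in enumerate(values):
--
--         for j in range(abs(value)):
--             cur_pos = (cur_pos + sign(value)) % 100
--             if cur_pos == 0:
--                counter += 1
--         # print (f"{i:5d} cur: {cur_pos:5d}, value: {value:5d}")
--         intermediate.append(counter)
--     return counter, intermediate
-- ===== SOURCE B (Python) =====
-- def calc_count(values):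
--     pos = 50
--     counter = 0
--     intermediate = []
--     for v in values:
--         n = abs(v)
--         s = 1 if v >= 0 else -1
--         k0 = (-s * pos) % 100 or 100
--         if n >= k0:
--             counter += (n - k0) // 100 + 1
--         pos = (pos + s * n) % 100
--         intermediate.append(counter)
--     return counter, intermediate
-- ===== Notes on version B (the rewrite author's own statement) =====
-- stated objective: faster
-- what changed: Replaces A's inner per-unit stepping loop (one iteration per unit of |value|) with a closed-form count of how many of the positions p+s, p+2s, ..., p+s*|value| are 0 mod 100, computed with one mod and one floor division per value.
import Mathlib
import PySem

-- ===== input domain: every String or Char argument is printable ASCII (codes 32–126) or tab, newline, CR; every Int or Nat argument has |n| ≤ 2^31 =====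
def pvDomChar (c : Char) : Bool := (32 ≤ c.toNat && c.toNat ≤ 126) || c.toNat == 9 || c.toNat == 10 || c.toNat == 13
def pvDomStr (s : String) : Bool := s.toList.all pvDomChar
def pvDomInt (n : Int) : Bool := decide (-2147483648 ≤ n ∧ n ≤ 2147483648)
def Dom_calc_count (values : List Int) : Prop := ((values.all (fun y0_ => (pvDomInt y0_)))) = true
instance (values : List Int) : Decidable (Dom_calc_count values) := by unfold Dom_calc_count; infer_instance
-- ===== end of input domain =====

-- B replaces A's per-unit stepping loop (O(sum |v|)) by a per-value closed-form count of
-- arithmetic-progression hits of 0 mod 100 (O(n)); return values are identical.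

-- ===== PORT A =====
-- sign(x): assert x != 0; return 1 if x > 0 else -1  (only ever called with x ≠ 0)
def pySign (x : Int) : Int := if x > 0 then 1 else -1

-- the body of A's `for i, value in enumerate(values)` loop (the index i is unused)
def stepA (st : Int × Int × List Int) (value : Int) : Int × Int × List Int :=
  let pc := (PySem.List.pyRange 0 |value| 1).foldl
    (fun (pc : Int × Int) _ =>
      let cur_pos := PySem.Int.mod (pc.1 + pySign value) 100
      (cur_pos, if cur_pos = 0 then pc.2 + 1 else pc.2)) (st.1, st.2.1)
  (pc.1, pc.2, st.2.2 ++ [pc.2])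

def calc_count (values : List Int) : Int × List Int :=
  let st := values.foldl stepA (50, 0, [])
  (st.2.1, st.2.2)

-- ===== PORT B =====
-- the body of B's single loop: closed-form hit count for one value
def stepB (st : Int × Int × List Int) (v : Int) : Int × Int × List Int :=
  let n : Int := |v|
  let s : Int := if 0 ≤ v then 1 else -1
  let m := PySem.Int.mod (-s * st.1) 100
  let k0 := if m = 0 then 100 else m          -- Python's `(-s*pos) % 100 or 100`
  let counter := if k0 ≤ n then st.2.1 + (PySem.Int.floordiv (n - k0) 100 + 1) else st.2.1
  let pos := PySem.Int.mod (st.1 + s * n) 100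
  (pos, counter, st.2.2 ++ [counter])

def calc_count_alt (values : List Int) : Int × List Int :=
  let st := values.foldl stepB (50, 0, [])
  (st.2.1, st.2.2)

-- ===== PRECONDITION & SPEC =====
def Spec_calc_count (values : List Int) (out : Int × List Int) : Prop := out = calc_count_alt values
instance (values : List Int) (out : Int × List Int) : Decidable (Spec_calc_count values out) := by unfold Spec_calc_count; infer_instance

-- ===== CLAIM (what is proved, stated in full; the proofs are below) =====
def Claim_equal_calc_count : Prop := ∀ (values : List Int), Dom_calc_count values → Spec_calc_count values (calc_count values)

-- ===== LEMMAS AND PROOFS =====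

-- one unit step of A's inner loop, with the (loop-constant) sign s
def gstep (s : Int) (pc : Int × Int) : Int × Int :=
  let cur_pos := PySem.Int.mod (pc.1 + s) 100
  (cur_pos, if cur_pos = 0 then pc.2 + 1 else pc.2)

-- A's inner fold ignores the loop variable: it is an iterate of gstep
lemma foldA (s : Int) (l : List Int) (st : Int × Int) :
    l.foldl (fun (pc : Int × Int) _ =>
      (PySem.Int.mod (pc.1 + s) 100,
       if PySem.Int.mod (pc.1 + s) 100 = 0 then pc.2 + 1 else pc.2)) st
      = (gstep s)^[l.length] st := by
  have := List.foldl_const (gstep s) st l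
  simpa [gstep] using this

lemma add_ite_zero (c t : Int) (X : Prop) [Decidable X] :
    c + (if X then t else 0) = if X then c + t else c := by
  split_ifs <;> omega

-- n unit steps from position p equal B's closed form
lemma iterate_gstep (s : Int) (hs : s = 1 ∨ s = -1) (n : Nat) :
    ∀ (p c : Int), 0 ≤ p → p < 100 →
    (gstep s)^[n] (p, c) =
      (PySem.Int.mod (p + s * n) 100,
       c + (if (if PySem.Int.mod (-s * p) 100 = 0 then 100 else PySem.Int.mod (-s * p) 100) ≤ (n : Int)
            then PySem.Int.floordiv ((n : Int) - (if PySem.Int.mod (-s * p) 100 = 0 then 100 else PySem.Int.mod (-s * p) 100)) 100 + 1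
            else 0)) := by
  induction n with
  | zero =>
    intro p c hp1 hp2
    simp only [Function.iterate_zero, id_eq, Nat.cast_zero, mul_zero, add_zero,
      PySem.Int.mod_eq_emod_of_pos (show (0:Int) < 100 by norm_num)]
    rcases hs with rfl | rfl <;>
      (refine Prod.ext ?_ ?_ <;> simp <;> (try split_ifs) <;> omega)
  | succ k ih =>
    intro p c hp1 hp2
    rw [Function.iterate_succ_apply', ih p c hp1 hp2]
    simp only [gstep, PySem.Int.mod_eq_emod_of_pos (show (0:Int) < 100 by norm_num),
      PySem.Int.floordiv_eq_ediv_of_pos (show (0:Int) < 100 by norm_num)]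
    rcases hs with rfl | rfl <;>
      (refine Prod.ext ?_ ?_ <;> simp only [Nat.cast_succ, one_mul, neg_neg, mul_comm] <;>
        (try split_ifs) <;> omega)

-- one outer-loop step of A equals one outer-loop step of B (for a position in [0,100))
lemma step_eq (v p c : Int) (acc : List Int) (hp1 : 0 ≤ p) (hp2 : p < 100) :
    stepA (p, c, acc) v = stepB (p, c, acc) v := by
  have habs : |v| = ((v.natAbs : Nat) : Int) := Int.abs_eq_natAbs v
  have hlen : (PySem.List.pyRange 0 ((v.natAbs : Nat) : Int) 1).length = v.natAbs := by
    simp [pysem]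
    omega
  rcases lt_trichotomy v 0 with hv | hv | hv
  · have hsign : pySign v = -1 := by simp only [pySign, if_neg (by omega : ¬ v > 0)]
    simp only [stepA, stepB, hsign, habs, foldA, hlen,
      iterate_gstep (-1) (Or.inr rfl) v.natAbs p c hp1 hp2,
      if_neg (show ¬ (0 ≤ v) by omega), add_ite_zero]
  · subst hv
    have h0 : PySem.List.pyRange 0 |(0 : Int)| 1 = [] := by decide
    have hp : PySem.Int.mod (p + 1 * |(0 : Int)|) 100 = p := by
      rw [show (1 : Int) * |(0 : Int)| = 0 by norm_num, add_zero,
        PySem.Int.mod_eq_emod_of_pos (show (0:Int) < 100 by norm_num)]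
      omega
    have hm0 : (0 : Int) ≤ PySem.Int.mod (-1 * p) 100 :=
      PySem.Int.mod_nonneg _ (by norm_num)
    simp only [stepA, stepB, h0, List.foldl_nil, if_pos (le_refl (0 : Int)), hp]
    have hk : ¬ ((if PySem.Int.mod (-1 * p) 100 = 0 then (100 : Int)
        else PySem.Int.mod (-1 * p) 100) ≤ |(0 : Int)|) := by
      simp only [abs_zero]
      split_ifs with h <;> omega
    simp only [hk, if_neg, not_false_iff]
  · have hsign : pySign v = 1 := by simp only [pySign, if_pos (by omega : v > 0)]
    simp only [stepA, stepB, hsign, habs, foldA, hlen,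
      iterate_gstep 1 (Or.inl rfl) v.natAbs p c hp1 hp2,
      if_pos (show (0 ≤ v) by omega), add_ite_zero]

-- the two folds agree from any state whose position lies in [0,100)
lemma foldl_eq (values : List Int) :
    ∀ (p c : Int) (acc : List Int), 0 ≤ p → p < 100 →
    values.foldl stepA (p, c, acc) = values.foldl stepB (p, c, acc) := by
  induction values with
  | nil => intro p c acc _ _; rfl
  | cons v vs ih =>
    intro p c acc hp1 hp2
    simp only [List.foldl_cons, step_eq v p c acc hp1 hp2]
    have h1 : 0 ≤ (stepB (p, c, acc) v).1 :=
      PySem.Int.mod_nonneg _ (by norm_num)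
    have h2 : (stepB (p, c, acc) v).1 < 100 :=
      PySem.Int.mod_lt _ (by norm_num)
    have := ih (stepB (p, c, acc) v).1 (stepB (p, c, acc) v).2.1 (stepB (p, c, acc) v).2.2 h1 h2
    simpa using this

-- ===== VERDICT (by name: the statement is the Claim_ definition above) =====
theorem calc_count_spec : Claim_equal_calc_count := by
  intro values _
  unfold Spec_calc_count calc_count calc_count_alt
  rw [foldl_eq values 50 0 [] (by norm_num) (by norm_num)]
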